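-- pv_equiv track=rewrite | github.com/robolaunch/ros-tracker | tests/helpers.py | compareDictionaries
-- ===== SOURCE A (Python) =====
-- def compareDictionaries(dict1, dict2, must_be_true, probably_false):
--     # for each key in the first dictionary
--     for key in dict1:
--         # if the key is in the must_be_true list
--         if key in must_be_true:
--             # if the key is not in the second dictionary
--             if key not in dict2:
--                 return False
--             # if the key is in the second dictionary
--             else:
--                 # if the value of the key in the first dictionary is not equal to the value of the key in the second dictionary
--                 if dict1[key] != dict2[key]:
--                     return False
--         # if the key is in the probably_false list
--         elif key in probably_false:
--             # if the key is not in the second dictionary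
--             if key not in dict2:
--                 return False
--     return True
-- ===== SOURCE B (Python) =====
-- def compareDictionaries(dict1, dict2, must_be_true, probably_false):
--     # Pass 1: every required key that dict1 has must appear in dict2 with the same value.
--     must_ok = all(
--         key not in dict1 or (key in dict2 and dict1[key] == dict2[key])
--         for key in must_be_true
--     )
--     # Pass 2: every optional key that dict1 has (and that is not also required)
--     # must at least appear in dict2.
--     opt_ok = all(
--         key not in dict1 or key in must_be_true or key in dict2
--         for key in probably_false
--     )
--     return must_ok and opt_ok
-- ===== Notes on version B (the rewrite author's own statement) =====
-- stated objective: alternative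
-- what changed: B drives two declarative all(...) passes over must_be_true and probably_false instead of A's single dict1-driven loop with if/elif branches and early returns.
import Mathlib
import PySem

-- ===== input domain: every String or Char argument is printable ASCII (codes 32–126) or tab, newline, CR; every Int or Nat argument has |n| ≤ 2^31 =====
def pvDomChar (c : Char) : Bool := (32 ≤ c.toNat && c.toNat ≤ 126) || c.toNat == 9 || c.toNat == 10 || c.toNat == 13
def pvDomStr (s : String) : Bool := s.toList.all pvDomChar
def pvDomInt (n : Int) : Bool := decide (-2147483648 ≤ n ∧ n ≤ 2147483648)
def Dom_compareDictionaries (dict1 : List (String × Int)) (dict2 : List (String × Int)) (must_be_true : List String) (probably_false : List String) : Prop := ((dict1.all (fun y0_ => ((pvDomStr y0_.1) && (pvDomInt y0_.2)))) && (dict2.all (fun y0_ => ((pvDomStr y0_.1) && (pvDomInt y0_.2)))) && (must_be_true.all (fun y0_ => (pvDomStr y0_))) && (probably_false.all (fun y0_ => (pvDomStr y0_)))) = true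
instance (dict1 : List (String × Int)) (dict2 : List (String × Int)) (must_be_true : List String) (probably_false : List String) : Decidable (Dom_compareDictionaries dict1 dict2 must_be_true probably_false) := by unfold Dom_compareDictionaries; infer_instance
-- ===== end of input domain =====

-- B replaces A's single dict1-driven if/elif loop by two all-passes over the requirement lists (alternative decomposition, same cost).


def cdHasKey (d : List (String × Int)) (k : String) : Bool :=
  d.any (fun p => p.1 == k)

-- ===== PORT A =====
-- A: one loop over dict1's entries; 'dict1[key]'/'dict2[key]' are first-match
-- lookups on the full lists, here as Option Int (the == is guarded by containment, so exact).
def cdGo (dict1 dict2 : List (String × Int)) (must_be_true probably_false : List String) : List (String × Int) → Bool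
  | [] => true
  | (k, _) :: rest =>
    if must_be_true.contains k then
      if !(cdHasKey dict2 k) then false
      else if !(List.lookup k dict1 == List.lookup k dict2) then false
      else cdGo dict1 dict2 must_be_true probably_false rest
    else if probably_false.contains k then
      if !(cdHasKey dict2 k) then false
      else cdGo dict1 dict2 must_be_true probably_false rest
    else cdGo dict1 dict2 must_be_true probably_false rest

def compareDictionaries (dict1 : List (String × Int)) (dict2 : List (String × Int)) (must_be_true : List String) (probably_false : List String) : Bool :=
  cdGo dict1 dict2 must_be_true probably_false dict1

-- ===== PORT B =====
-- B: two all-passes over the requirement lists.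
def compareDictionaries_alt (dict1 : List (String × Int)) (dict2 : List (String × Int)) (must_be_true : List String) (probably_false : List String) : Bool :=
  (must_be_true.all (fun k =>
      !(cdHasKey dict1 k) || (cdHasKey dict2 k && (List.lookup k dict1 == List.lookup k dict2)))) &&
  (probably_false.all (fun k =>
      !(cdHasKey dict1 k) || must_be_true.contains k || cdHasKey dict2 k))

-- ===== PRECONDITION & SPEC =====
def Spec_compareDictionaries (dict1 : List (String × Int)) (dict2 : List (String × Int)) (must_be_true : List String) (probably_false : List String) (out : Bool) : Prop := out = compareDictionaries_alt dict1 dict2 must_be_true probably_false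
instance (dict1 : List (String × Int)) (dict2 : List (String × Int)) (must_be_true : List String) (probably_false : List String) (out : Bool) : Decidable (Spec_compareDictionaries dict1 dict2 must_be_true probably_false out) := by unfold Spec_compareDictionaries; infer_instance

-- ===== CLAIM (what is proved, stated in full; the proofs are below) =====
def Claim_equal_compareDictionaries : Prop := ∀ (dict1 : List (String × Int)) (dict2 : List (String × Int)) (must_be_true : List String) (probably_false : List String), Dom_compareDictionaries dict1 dict2 must_be_true probably_false → Spec_compareDictionaries dict1 dict2 must_be_true probably_false (compareDictionaries dict1 dict2 must_be_true probably_false)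

-- ===== LEMMAS AND PROOFS =====

-- the per-key check A performs when it reaches a dict1 entry with key k
def cdGood (dict1 dict2 : List (String × Int)) (must_be_true probably_false : List String) (k : String) : Bool :=
  if must_be_true.contains k then
    cdHasKey dict2 k && (List.lookup k dict1 == List.lookup k dict2)
  else if probably_false.contains k then cdHasKey dict2 k
  else true

lemma cdGo_eq_all (dict1 dict2 : List (String × Int)) (mbt pf : List String) (l : List (String × Int)) :
    cdGo dict1 dict2 mbt pf l = l.all (fun p => cdGood dict1 dict2 mbt pf p.1) := by
  induction l with
  | nil => rfl
  | cons p rest ih =>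
    obtain ⟨k, v⟩ := p
    simp only [cdGo, cdGood, List.all_cons, ih]
    split_ifs <;> simp_all

lemma cdMain (dict1 dict2 : List (String × Int)) (mbt pf : List String) :
    compareDictionaries dict1 dict2 mbt pf = compareDictionaries_alt dict1 dict2 mbt pf := by
  rw [compareDictionaries, cdGo_eq_all, compareDictionaries_alt, Bool.eq_iff_iff]
  simp only [List.all_eq_true, Bool.and_eq_true]
  constructor
  · intro h
    constructor
    · intro k hk
      by_cases hc : cdHasKey dict1 k = true
      · obtain ⟨p, hp, hpk⟩ := List.any_eq_true.mp hc
        have hpk' : p.1 = k := by simpa using hpk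
        have hg := h p hp
        rw [cdGood, hpk', if_pos (by simpa using hk)] at hg
        simp [hg]
      · simp [Bool.not_eq_true] at hc
        simp [hc]
    · intro k hk
      by_cases hc : cdHasKey dict1 k = true
      · by_cases hm : k ∈ mbt
        · simp [hm]
        · obtain ⟨p, hp, hpk⟩ := List.any_eq_true.mp hc
          have hpk' : p.1 = k := by simpa using hpk
          have hg := h p hp
          rw [cdGood, hpk', if_neg (by simpa using hm), if_pos (by simpa using hk)] at hg
          simp [hg]
      · simp [Bool.not_eq_true] at hc
        simp [hc]
  · rintro ⟨h1, h2⟩ p hp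
    have hc : cdHasKey dict1 p.1 = true := List.any_eq_true.mpr ⟨p, hp, by simp⟩
    rw [cdGood]
    split_ifs with hm hpf
    · have := h1 p.1 (by simpa using hm)
      simp [hc] at this
      simp [this]
    · have := h2 p.1 (by simpa using hpf)
      simp [hc] at this hm ⊢
      tauto
    · rfl

-- ===== VERDICT (by name: the statement is the Claim_ definition above) =====
theorem compareDictionaries_spec : Claim_equal_compareDictionaries := by
  intro d1 d2 mbt pf _
  exact cdMain d1 d2 mbt pf
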